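-- pv_equiv track=rewrite | github.com/abhishek25dh/exp-pipeline | layout_7_step_2.py | split_segment
-- ===== SOURCE A (Python) =====
-- def split_segment(start: int, end: int, slots: int):
--     if slots == 0:
--         return []
--     length = end - start
--     sizes = [length // slots] * slots
--     for i in range(length % slots):
--         sizes[i] += 1
--     spans = []
--     cur = start
--     for sz in sizes:
--         nxt = cur + sz
--         spans.append([cur, nxt])
--         cur = nxt
--     return spans
-- ===== SOURCE B (Python) =====
-- def split_segment(start: int, end: int, slots: int):
--     if slots == 0:
--         return []
--     q, r = divmod(end - start, slots)
--     return [[start + i * q + min(i, r), start + (i + 1) * q + min(i + 1, r)]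
--             for i in range(slots)]
-- ===== Notes on version B (the rewrite author's own statement) =====
-- stated objective: simpler
-- what changed: B replaces A's mutable sizes array and sequential running-cursor loop with a single closed-form comprehension computing each span's endpoints directly as start + i*q + min(i, r) from q, r = divmod(end - start, slots).
import Mathlib
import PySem

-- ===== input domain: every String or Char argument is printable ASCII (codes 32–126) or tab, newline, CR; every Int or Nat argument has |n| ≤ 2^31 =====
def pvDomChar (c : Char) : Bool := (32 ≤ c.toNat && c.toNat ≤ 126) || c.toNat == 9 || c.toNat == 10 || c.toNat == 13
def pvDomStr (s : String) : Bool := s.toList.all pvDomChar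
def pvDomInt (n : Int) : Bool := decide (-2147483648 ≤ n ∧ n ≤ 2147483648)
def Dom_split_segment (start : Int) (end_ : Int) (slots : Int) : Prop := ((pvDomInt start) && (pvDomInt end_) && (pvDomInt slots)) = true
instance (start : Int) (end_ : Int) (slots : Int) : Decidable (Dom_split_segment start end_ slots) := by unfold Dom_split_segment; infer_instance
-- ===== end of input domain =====

-- B replaces A's sizes array and running cursor with a closed-form per-index formula (objective: simpler).

-- ===== PORT A =====
def split_segment (start : Int) (end_ : Int) (slots : Int) : List (List Int) :=
  if slots == 0 then []
  else
    let length := end_ - start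
    -- [length // slots] * slots  ('* slots' clamps a negative count to the empty list, as in Python)
    let sizes0 : List Int := List.replicate slots.toNat (PySem.Int.floordiv length slots)
    -- for i in range(length % slots): sizes[i] += 1   (i is always a valid index when the loop runs)
    let sizes : List Int :=
      (PySem.List.pyRange 0 (PySem.Int.mod length slots) 1).foldl
        (fun sz i => sz.modify i.toNat (· + 1)) sizes0
    -- spans = []; cur = start; for sz in sizes: …
    (sizes.foldl
      (fun (p : List (List Int) × Int) sz => (p.1 ++ [[p.2, p.2 + sz]], p.2 + sz))
      ([], start)).1

-- ===== PORT B =====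
def split_segment_alt (start : Int) (end_ : Int) (slots : Int) : List (List Int) :=
  if slots == 0 then []
  else
    let q := PySem.Int.floordiv (end_ - start) slots
    let r := PySem.Int.mod (end_ - start) slots
    (PySem.List.pyRange 0 slots 1).map
      (fun i => [start + i * q + min i r, start + (i + 1) * q + min (i + 1) r])

-- ===== PRECONDITION & SPEC =====
def Spec_split_segment (start : Int) (end_ : Int) (slots : Int) (out : List (List Int)) : Prop := out = split_segment_alt start end_ slots
instance (start : Int) (end_ : Int) (slots : Int) (out : List (List Int)) : Decidable (Spec_split_segment start end_ slots out) := by unfold Spec_split_segment; infer_instance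

-- ===== CLAIM (what is proved, stated in full; the proofs are below) =====
def Claim_equal_split_segment : Prop := ∀ (start : Int) (end_ : Int) (slots : Int), Dom_split_segment start end_ slots → Spec_split_segment start end_ slots (split_segment start end_ slots)

-- ===== LEMMAS AND PROOFS =====

/-- The spans A's second loop produces from a list of sizes, starting at `cur`. -/
def spansFrom (cur : Int) : List Int → List (List Int)
  | [] => []
  | s :: t => [cur, cur + s] :: spansFrom (cur + s) t

theorem foldl_spansFrom (szs : List Int) (acc : List (List Int)) (cur : Int) :
    (szs.foldl
      (fun (p : List (List Int) × Int) sz => (p.1 ++ [[p.2, p.2 + sz]], p.2 + sz))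
      (acc, cur)).1 = acc ++ spansFrom cur szs := by
  induction szs generalizing acc cur with
  | nil => simp [spansFrom]
  | cons s t ih => simp [spansFrom, ih]

/-- A's increment loop turns the constant sizes array into the pointwise formula. -/
theorem sizes_formula (n : Nat) (q : Int) : ∀ (r' : Nat), r' ≤ n →
    (PySem.List.pyRange 0 (r' : Int) 1).foldl
        (fun sz i => sz.modify i.toNat (· + 1)) (List.replicate n q)
      = (List.range n).map (fun k => q + if k < r' then 1 else 0) := by
  intro r' hr'
  induction r' with
  | zero => simp
  | succ m ih =>
    have hm : m ≤ n := Nat.le_of_succ_le hr'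
    have hcast : ((m : Int) + 1) = ((m + 1 : Nat) : Int) := by push_cast; ring
    rw [← hcast, PySem.List.pyRange_one_succ_right (by positivity), List.foldl_append,
        ih hm]
    simp only [List.foldl_cons, List.foldl_nil]
    apply List.ext_getElem (by simp)
    intro k h1 h2
    simp only [List.length_map, List.length_range] at h1 h2
    rw [List.getElem_modify]
    have hmtoNat : (m : Int).toNat = m := by simp
    simp only [hmtoNat, List.getElem_map, List.getElem_range]
    by_cases hk : m = k
    · subst hk; simp
    · simp only [if_neg hk]
      rcases Nat.lt_or_ge k m with hlt | hge
      · rw [if_pos hlt, if_pos (by omega)]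
      · rw [if_neg (by omega), if_neg (by omega)]

/-- Walking the size formula from any index `j` with the matching cursor yields B's spans. -/
theorem spansFrom_formula (startv q r : Int) (hr : 0 ≤ r) :
    ∀ (m j : Nat),
      spansFrom (startv + (j : Int) * q + min (j : Int) r)
          (List.map (fun k : Nat => q + if (k : Int) < r then 1 else 0) (List.range' j m))
        = List.map (fun k : Nat =>
            [startv + (k : Int) * q + min (k : Int) r,
             startv + ((k : Int) + 1) * q + min ((k : Int) + 1) r]) (List.range' j m) := by
  intro m
  induction m with
  | zero => intro j; simp [spansFrom]
  | succ m ih =>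
    intro j
    rw [List.range'_succ]
    simp only [List.map_cons, spansFrom]
    have hcur : startv + (j : Int) * q + min (j : Int) r +
        (q + if (j : Int) < r then 1 else 0)
        = startv + ((j : Int) + 1) * q + min ((j : Int) + 1) r := by
      by_cases hjr : (j : Int) < r
      · rw [min_eq_left (le_of_lt hjr), if_pos hjr, min_eq_left (by omega)]; ring
      · have hjr' : r ≤ (j : Int) := by omega
        rw [min_eq_right hjr', min_eq_right (by omega), if_neg (by omega)]; ring
    rw [hcur]
    have := ih (j + 1)
    push_cast at this ⊢
    rw [this]

theorem split_segment_neg (start end_ slots : Int) (h : slots < 0) :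
    split_segment start end_ slots = [] := by
  have h0 : ¬ (slots == 0) = true := by simp; omega
  have hmod := PySem.Int.mod_neg_bounds (a := end_ - start) h
  simp only [split_segment, if_neg h0]
  rw [PySem.List.pyRange_one_eq_nil (by omega)]
  have : slots.toNat = 0 := by omega
  simp [this]

theorem split_segment_alt_neg (start end_ slots : Int) (h : slots < 0) :
    split_segment_alt start end_ slots = [] := by
  have h0 : ¬ (slots == 0) = true := by simp; omega
  simp only [split_segment_alt, if_neg h0]
  rw [PySem.List.pyRange_one_eq_nil (by omega)]
  simp

theorem split_segment_pos (start end_ slots : Int) (h : 0 < slots) :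
    split_segment start end_ slots = split_segment_alt start end_ slots := by
  have h0 : ¬ (slots == 0) = true := by simp; omega
  set q := PySem.Int.floordiv (end_ - start) slots with hq
  set r := PySem.Int.mod (end_ - start) slots with hr
  have hr0 : 0 ≤ r := PySem.Int.mod_nonneg _ h
  have hrlt : r < slots := PySem.Int.mod_lt _ h
  set n : Nat := slots.toNat with hn
  have hslots : (n : Int) = slots := by omega
  set r' : Nat := r.toNat with hr'
  have hrcast : (r' : Int) = r := by omega
  have hr'n : r' ≤ n := by omega
  simp only [split_segment, split_segment_alt, if_neg h0, ← hq, ← hr]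
  rw [foldl_spansFrom, List.nil_append]
  have hsz : (PySem.List.pyRange 0 r 1).foldl
        (fun sz i => sz.modify i.toNat (· + 1)) (List.replicate n q)
      = List.map (fun k : Nat => q + if (k : Int) < r then 1 else 0) (List.range' 0 n) := by
    rw [← hrcast, sizes_formula n q r' hr'n, List.range_eq_range']
    apply List.map_congr_left
    intro k _
    rcases Nat.lt_or_ge k r' with hlt | hge
    · rw [if_pos hlt, if_pos (by exact_mod_cast hlt)]
    · rw [if_neg (Nat.not_lt.mpr hge), if_neg (by exact_mod_cast Nat.not_lt.mpr hge)]
  rw [hsz]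
  have key := spansFrom_formula start q r hr0 n 0
  have hc0 : start + ((0 : Nat) : Int) * q + min ((0 : Nat) : Int) r = start := by
    simp [min_eq_left hr0]
  rw [hc0] at key
  rw [key]
  have hpy : PySem.List.pyRange 0 slots 1 = (List.range' 0 n).map (fun k : Nat => (k : Int)) := by
    rw [← hslots, PySem.List.pyRange_zero_nat, List.range_eq_range']
  rw [hpy, List.map_map]
  apply List.map_congr_left
  intro k _
  simp

-- ===== VERDICT (by name: the statement is the Claim_ definition above) =====
theorem split_segment_spec : Claim_equal_split_segment := by
  intro start end_ slots _
  unfold Spec_split_segment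
  rcases lt_trichotomy slots 0 with h | h | h
  · rw [split_segment_neg _ _ _ h, split_segment_alt_neg _ _ _ h]
  · subst h; rfl
  · exact split_segment_pos _ _ _ h
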